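-- pv_equiv track=rewrite | github.com/JoseBalbuena181096/python2019 | loveAutomation/honey_love.py | heart
-- ===== SOURCE A (Python) =====
-- def heart(f):
--     s = ""
--     for row in range(6):
--         for col in range(7):
--             if(row==0 and col%3!=0)or(row==1 and col%3==0) or (row-col==2) or (row+col==8):
--                 s+=f+" "
--             else:
--                 s+="  "
--         s+="\n"
--     return s
-- ===== SOURCE B (Python) =====
-- def heart(f):
--     rows = [".XX.XX.", "X..X..X", "X.....X", ".X...X.", "..X.X..", "...X..."]
--     out = []
--     for mask in rows:
--         for c in mask:
--             out.append(f + " " if c == "X" else "  ")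
--         out.append("\n")
--     return "".join(out)
-- ===== Notes on version B (the rewrite author's own statement) =====
-- stated objective: simpler
-- what changed: Replaces the per-cell arithmetic predicate (col%3, row-col, row+col) with a precomputed 6x7 mask table of strings, iterating over the table to emit cells and joining the pieces at the end.
import Mathlib
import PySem

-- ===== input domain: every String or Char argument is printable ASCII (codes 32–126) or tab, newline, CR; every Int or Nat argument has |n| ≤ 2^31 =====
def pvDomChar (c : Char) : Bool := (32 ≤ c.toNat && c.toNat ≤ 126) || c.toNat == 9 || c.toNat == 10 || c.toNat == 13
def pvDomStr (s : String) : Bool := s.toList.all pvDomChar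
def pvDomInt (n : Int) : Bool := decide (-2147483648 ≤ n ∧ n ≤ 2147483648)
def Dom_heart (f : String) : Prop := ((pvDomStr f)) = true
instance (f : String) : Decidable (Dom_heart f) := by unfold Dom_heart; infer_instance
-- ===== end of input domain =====

-- B replaces the per-cell geometric predicate by a fixed 6×7 mask table (objective: simpler).

-- ===== PORT A =====
def heart (f : String) : String :=
  (PySem.List.pyRange 0 6 1).foldl (fun s row =>
    ((PySem.List.pyRange 0 7 1).foldl (fun s col =>
      if (row = 0 ∧ PySem.Int.mod col 3 ≠ 0) ∨ (row = 1 ∧ PySem.Int.mod col 3 = 0)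
          ∨ (row - col = 2) ∨ (row + col = 8)
      then s ++ f ++ " " else s ++ "  ") s) ++ "\n") ""

-- ===== PORT B =====
def heartRows : List String :=
  [".XX.XX.", "X..X..X", "X.....X", ".X...X.", "..X.X..", "...X..."]

def heart_alt (f : String) : String :=
  String.join
    (heartRows.foldl (fun acc mask =>
      (mask.toList.foldl (fun acc c =>
        acc ++ [if c = 'X' then f ++ " " else "  "]) acc) ++ ["\n"]) [])

-- ===== PRECONDITION & SPEC =====
def Spec_heart (f : String) (out : String) : Prop := out = heart_alt f
instance (f : String) (out : String) : Decidable (Spec_heart f out) := by unfold Spec_heart; infer_instance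

-- ===== CLAIM (what is proved, stated in full; the proofs are below) =====
def Claim_equal_heart : Prop := ∀ (f : String), Dom_heart f → Spec_heart f (heart f)

-- ===== LEMMAS AND PROOFS =====
theorem heart_eq_alt (f : String) : heart f = heart_alt f := by
  simp [heart, heart_alt, heartRows, PySem.List.pyRange, PySem.Int.mod,
    String.join, List.range_succ, String.append_assoc]

-- ===== VERDICT (by name: the statement is the Claim_ definition above) =====
theorem heart_spec : Claim_equal_heart := by
  intro f _
  exact heart_eq_alt f
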